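-- pv_equiv track=rewrite | github.com/lssfau/walberla | apps/benchmarks/UniformGridGenerated/params.py | get_block_decomposition
-- ===== SOURCE A (Python) =====
-- import math
--
-- def get_block_decomposition(block_decomposition, num_processes):
--     bx = by = bz = 1
--     blocks_per_axis = int(math.log(num_processes, 2))
--     for i in range(blocks_per_axis):
--         decomposition_axis = block_decomposition[i % len(block_decomposition)]
--         if decomposition_axis == 'y':
--             by *= 2
--         elif decomposition_axis == 'z':
--             bz *= 2
--         elif decomposition_axis == 'x':
--             bx *= 2
--
--     assert (bx * by * bz) == num_processes
--     return bx, by, bz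
-- ===== SOURCE B (Python) =====
-- import math
--
--
-- def get_block_decomposition(block_decomposition, num_processes):
--     blocks_per_axis = int(math.log(num_processes, 2))
--     ex = ey = ez = 0
--     if blocks_per_axis > 0:
--         q, r = divmod(blocks_per_axis, len(block_decomposition))
--         for j, axis in enumerate(block_decomposition):
--             c = q + (1 if j < r else 0)
--             if axis == 'x':
--                 ex += c
--             elif axis == 'y':
--                 ey += c
--             elif axis == 'z':
--                 ez += c
--     bx, by, bz = 2 ** ex, 2 ** ey, 2 ** ez
--     assert (bx * by * bz) == num_processes
--     return bx, by, bz
-- ===== Notes on version B (the rewrite author's own statement) =====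
-- stated objective: alternative
-- what changed: B replaces A's loop of blocks_per_axis steps with cyclic indexing (block_decomposition[i % L]) by a single pass over the axis list, computing each position's visit count in closed form from divmod(blocks_per_axis, L) and accumulating per-axis exponents.
import Mathlib
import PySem

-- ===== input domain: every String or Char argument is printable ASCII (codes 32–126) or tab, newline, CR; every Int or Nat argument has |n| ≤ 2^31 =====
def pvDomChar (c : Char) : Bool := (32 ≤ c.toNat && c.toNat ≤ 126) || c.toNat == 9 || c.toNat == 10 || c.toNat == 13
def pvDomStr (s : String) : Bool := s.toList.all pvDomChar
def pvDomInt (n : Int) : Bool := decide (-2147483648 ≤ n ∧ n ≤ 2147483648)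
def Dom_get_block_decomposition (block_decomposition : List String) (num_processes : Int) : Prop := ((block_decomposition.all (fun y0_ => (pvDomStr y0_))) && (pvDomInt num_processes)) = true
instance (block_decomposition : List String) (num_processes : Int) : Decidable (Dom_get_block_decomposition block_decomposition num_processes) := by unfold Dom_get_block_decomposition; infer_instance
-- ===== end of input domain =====

-- B replaces A's cyclic-index loop over blocks_per_axis steps by a single pass over the
-- axis list with a closed-form divmod count per position (alternative algorithm).


-- ===== PORT A =====
-- int(math.log(num_processes, 2)) is ported as the exact integer log2: on the inputs Pre_
-- admits, num_processes is a power of two within the int domain, where CPython's float log is exact.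
def get_block_decomposition (block_decomposition : List String) (num_processes : Int) : Int × Int × Int :=
  let blocks_per_axis : Int := (Nat.log 2 num_processes.toNat : Int)
  (PySem.List.pyRange 0 blocks_per_axis 1).foldl
    (fun (s : Int × Int × Int) i =>
      -- block_decomposition[i % len(block_decomposition)]; Pre_ excludes the
      -- ZeroDivisionError case, so the defaults are never taken
      let decomposition_axis :=
        (PySem.List.pyGet? block_decomposition
          (PySem.Int.mod i (block_decomposition.length : Int))).getD ""
      if decomposition_axis = "y" then (s.1, s.2.1 * 2, s.2.2)
      else if decomposition_axis = "z" then (s.1, s.2.1, s.2.2 * 2)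
      else if decomposition_axis = "x" then (s.1 * 2, s.2.1, s.2.2)
      else s)
    (1, 1, 1)

-- ===== PORT B =====
def get_block_decomposition_alt (block_decomposition : List String) (num_processes : Int) : Int × Int × Int :=
  let blocks_per_axis : Int := (Nat.log 2 num_processes.toNat : Int)
  let e : Int × Int × Int :=
    if blocks_per_axis > 0 then
      -- q, r = divmod(blocks_per_axis, len(block_decomposition)); Pre_ excludes the
      -- ZeroDivisionError case, so the default is never taken
      let qr := (PySem.Int.divmod? blocks_per_axis (block_decomposition.length : Int)).getD (0, 0)
      (PySem.List.enumerate block_decomposition).foldl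
        (fun (s : Int × Int × Int) p =>
          let c := qr.1 + (if p.1 < qr.2 then 1 else 0)
          if p.2 = "x" then (s.1 + c, s.2.1, s.2.2)
          else if p.2 = "y" then (s.1, s.2.1 + c, s.2.2)
          else if p.2 = "z" then (s.1, s.2.1, s.2.2 + c)
          else s)
        (0, 0, 0)
    else (0, 0, 0)
  ((2 : Int) ^ e.1.toNat, (2 : Int) ^ e.2.1.toNat, (2 : Int) ^ e.2.2.toNat)

-- ===== PRECONDITION & SPEC =====
-- Exactly the inputs on which the Python A returns: num_processes must be a power of two
-- (math.log raises ValueError for n ≤ 0; for any other n the final assert fails), the list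
-- must be nonempty when the loop runs at all (else i % 0 raises ZeroDivisionError), and every
-- accessed element must be 'x', 'y' or 'z' (else a factor 2 is missing and the assert fails).
def Pre_get_block_decomposition (block_decomposition : List String) (num_processes : Int) : Prop :=
  0 < num_processes ∧ num_processes = 2 ^ (Nat.log 2 num_processes.toNat) ∧
    (num_processes = 1 ∨ block_decomposition ≠ []) ∧
    ∀ i < Nat.log 2 num_processes.toNat,
      (block_decomposition[i % block_decomposition.length]?).getD ""
        ∈ (["x", "y", "z"] : List String)
instance (block_decomposition : List String) (num_processes : Int) : Decidable (Pre_get_block_decomposition block_decomposition num_processes) := by unfold Pre_get_block_decomposition; infer_instance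
def pvWitness_get_block_decomposition : List String × Int := (["x", "y"], 8)

def Spec_get_block_decomposition (block_decomposition : List String) (num_processes : Int) (out : Int × Int × Int) : Prop := out = get_block_decomposition_alt block_decomposition num_processes
instance (block_decomposition : List String) (num_processes : Int) (out : Int × Int × Int) : Decidable (Spec_get_block_decomposition block_decomposition num_processes out) := by unfold Spec_get_block_decomposition; infer_instance

-- ===== CLAIM (what is proved, stated in full; the proofs are below) =====
def Claim_equal_get_block_decomposition : Prop := ∀ (block_decomposition : List String) (num_processes : Int), Dom_get_block_decomposition block_decomposition num_processes → Pre_get_block_decomposition block_decomposition num_processes → Spec_get_block_decomposition block_decomposition num_processes (get_block_decomposition block_decomposition num_processes)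

-- ===== LEMMAS AND PROOFS =====

-- The exponent both programs compute for axis s after K loop steps: each position j of the
-- list is visited K/L + (1 if j < K%L) times by A's cyclic indexing.
def pvS (bd : List String) (s : String) (K : Nat) : Nat :=
  ∑ j ∈ Finset.range bd.length,
    (if (bd[j]?).getD "" = s then K / bd.length + (if j < K % bd.length then 1 else 0) else 0)

lemma pvS_zero (bd : List String) (s : String) : pvS bd s 0 = 0 := by
  simp [pvS]

lemma pvS_succ (bd : List String) (s : String) (K : Nat) (hL : 0 < bd.length) :
    pvS bd s (K + 1) = pvS bd s K + (if (bd[K % bd.length]?).getD "" = s then 1 else 0) := by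
  have hbL : K % bd.length < bd.length := Nat.mod_lt _ hL
  have hdm := Nat.div_add_mod K bd.length
  have hdelta : (if (bd[K % bd.length]?).getD "" = s then (1:Nat) else 0)
      = ∑ j ∈ Finset.range bd.length,
          (if j = K % bd.length then (if (bd[j]?).getD "" = s then 1 else 0) else 0) := by
    rw [Finset.sum_ite_eq' (Finset.range bd.length) (K % bd.length)
          (fun j => if (bd[j]?).getD "" = s then (1:Nat) else 0)]
    simp [Finset.mem_range.mpr hbL]
  rw [hdelta, pvS, pvS, ← Finset.sum_add_distrib]
  rcases Nat.lt_or_ge (K % bd.length + 1) bd.length with hcase | hcase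
  · -- (K+1)/L = K/L, (K+1)%L = K%L + 1
    have hK1 : K + 1 = bd.length * (K / bd.length) + (K % bd.length + 1) := by omega
    have hdiv : (K + 1) / bd.length = K / bd.length := by
      rw [hK1, Nat.mul_add_div hL, Nat.div_eq_of_lt hcase, Nat.add_zero]
    have hmod : (K + 1) % bd.length = K % bd.length + 1 := by
      rw [hK1, Nat.mul_add_mod, Nat.mod_eq_of_lt hcase]
    rw [hdiv, hmod]
    refine Finset.sum_congr rfl ?_
    intro j hj
    have hjL := Finset.mem_range.mp hj
    by_cases hjb : j = K % bd.length
    · subst hjb; split_ifs <;> omega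
    · split_ifs <;> omega
  · -- K%L + 1 = L: (K+1)/L = K/L + 1, (K+1)%L = 0
    have hEq : K % bd.length + 1 = bd.length := by omega
    have hK1 : K + 1 = bd.length * (K / bd.length + 1) := by rw [Nat.mul_succ]; omega
    have hdiv : (K + 1) / bd.length = K / bd.length + 1 := by
      rw [hK1, Nat.mul_div_cancel_left _ hL]
    have hmod : (K + 1) % bd.length = 0 := by rw [hK1, Nat.mul_mod_right]
    rw [hdiv, hmod]
    refine Finset.sum_congr rfl ?_
    intro j hj
    have hjL := Finset.mem_range.mp hj
    by_cases hjb : j = K % bd.length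
    · subst hjb; split_ifs <;> omega
    · split_ifs <;> omega

-- A's loop computes (2^pvS"x", 2^pvS"y", 2^pvS"z").
lemma pvAFold (bd : List String) (hL : 0 < bd.length) (K : Nat) :
    (PySem.List.pyRange 0 (K : Int) 1).foldl
      (fun (s : Int × Int × Int) i =>
        let decomposition_axis :=
          (PySem.List.pyGet? bd (PySem.Int.mod i (bd.length : Int))).getD ""
        if decomposition_axis = "y" then (s.1, s.2.1 * 2, s.2.2)
        else if decomposition_axis = "z" then (s.1, s.2.1, s.2.2 * 2)
        else if decomposition_axis = "x" then (s.1 * 2, s.2.1, s.2.2)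
        else s)
      (1, 1, 1)
    = ((2:Int) ^ pvS bd "x" K, (2:Int) ^ pvS bd "y" K, (2:Int) ^ pvS bd "z" K) := by
  induction K with
  | zero => simp [PySem.List.pyRange_one_eq_nil (le_refl (0:Int)), pvS_zero]
  | succ K ih =>
      have hr : PySem.List.pyRange 0 ((K + 1 : Nat) : Int) 1
          = PySem.List.pyRange 0 (K : Int) 1 ++ [(K : Int)] := by
        push_cast
        exact PySem.List.pyRange_one_succ_right (by positivity)
      rw [hr, List.foldl_append, ih]
      simp only [List.foldl_cons, List.foldl_nil, PySem.Int.mod_natCast,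
        PySem.List.pyGet?_natCast]
      rw [pvS_succ bd "x" K hL, pvS_succ bd "y" K hL, pvS_succ bd "z" K hL]
      by_cases hy : (bd[K % bd.length]?).getD "" = "y"
      · simp [hy, pow_succ]
      · by_cases hz : (bd[K % bd.length]?).getD "" = "z"
        · simp [hz, pow_succ]
        · by_cases hx : (bd[K % bd.length]?).getD "" = "x"
          · simp [hx, pow_succ]
          · simp [hy, hz, hx]

-- B's per-axis sum over the enumerated list.
def pvEX (bd : List String) (s : String) (q r start : Int) : Int :=
  ((PySem.List.enumerate bd start).map
    (fun p => if p.2 = s then q + (if p.1 < r then 1 else 0) else 0)).sum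

lemma pvEX_cons (x : String) (bd : List String) (s : String) (q r start : Int) :
    pvEX (x :: bd) s q r start
      = (if x = s then q + (if start < r then 1 else 0) else 0) + pvEX bd s q r (start + 1) := by
  simp [pvEX, PySem.List.enumerate_cons]

-- B's loop adds the three per-axis sums to the accumulator.
lemma pvBFold (q r : Int) : ∀ (bd : List String) (start : Int) (s0 : Int × Int × Int),
    (PySem.List.enumerate bd start).foldl
      (fun (s : Int × Int × Int) p =>
        let c := q + (if p.1 < r then 1 else 0)
        if p.2 = "x" then (s.1 + c, s.2.1, s.2.2)
        else if p.2 = "y" then (s.1, s.2.1 + c, s.2.2)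
        else if p.2 = "z" then (s.1, s.2.1, s.2.2 + c)
        else s)
      s0
    = (s0.1 + pvEX bd "x" q r start, s0.2.1 + pvEX bd "y" q r start,
       s0.2.2 + pvEX bd "z" q r start) := by
  intro bd
  induction bd with
  | nil => intro start s0; simp [PySem.List.enumerate_nil, pvEX]
  | cons x bd ih =>
      intro start s0
      rw [PySem.List.enumerate_cons, List.foldl_cons, ih,
        pvEX_cons x bd "x" q r start, pvEX_cons x bd "y" q r start,
        pvEX_cons x bd "z" q r start]
      by_cases hx : x = "x"
      · simp [hx, add_assoc]
      · by_cases hy : x = "y"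
        · simp [hy, add_assoc]
        · by_cases hz : x = "z"
          · simp [hz, add_assoc]
          · simp [hx, hy, hz]

lemma pvEX_eq_sum (s : String) (q r : Int) : ∀ (bd : List String) (start : Int),
    pvEX bd s q r start = ∑ j ∈ Finset.range bd.length,
      (if (bd[j]?).getD "" = s then q + (if start + (j : Int) < r then 1 else 0) else 0) := by
  intro bd
  induction bd with
  | nil => intro start; simp [pvEX]
  | cons x bd ih =>
      intro start
      rw [pvEX_cons, ih (start + 1), List.length_cons, Finset.sum_range_succ', add_comm]
      congr 1
      · refine Finset.sum_congr rfl ?_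
        intro j hj
        have harith : start + ((j : Int) + 1) = start + 1 + (j : Int) := by ring
        simp [List.getElem?_cons_succ, harith]
      · simp

-- With q, r = divmod(K, L), B's per-axis sum is exactly A's exponent pvS.
lemma pvEX_eq_pvS (bd : List String) (s : String) (K : Nat) :
    pvEX bd s ((K / bd.length : Nat) : Int) ((K % bd.length : Nat) : Int) 0
      = (pvS bd s K : Int) := by
  rw [pvEX_eq_sum, pvS]
  push_cast
  refine Finset.sum_congr rfl ?_
  intro j hj
  have h2 : ((j : Int) < (K : Int) % (bd.length : Int)) ↔ j < K % bd.length := by omega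
  simp [h2]

lemma pvDivmod_nat (K L : Nat) (h : 0 < L) :
    PySem.Int.divmod? (K : Int) (L : Int) = some (((K / L : Nat) : Int), ((K % L : Nat) : Int)) := by
  unfold PySem.Int.divmod?
  simp
  refine ⟨by omega, ?_, ?_⟩ <;> simp [Int.fdiv_eq_ediv, Int.fmod_eq_emod]

-- ===== VERDICT (by name: the statement is the Claim_ definition above) =====
theorem get_block_decomposition_spec : Claim_equal_get_block_decomposition := by
  intro bd np _hDom hPre
  obtain ⟨hpos, hnp, hk0, _hxyz⟩ := hPre
  set k : Nat := Nat.log 2 np.toNat with hkdef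
  unfold Spec_get_block_decomposition get_block_decomposition get_block_decomposition_alt
  rw [← hkdef]
  by_cases hk : k = 0
  · simp only [hk]
    simp [PySem.List.pyRange_one_eq_nil (le_refl (0:Int))]
  · have hbd : bd ≠ [] := by
      refine hk0.resolve_left ?_
      intro h1
      apply hk
      rw [hkdef, h1]
      simp
    have hL : 0 < bd.length := List.length_pos_iff.mpr hbd
    have hkpos : (0:Int) < (k : Nat) := by exact_mod_cast Nat.pos_of_ne_zero hk
    rw [pvAFold bd hL k]
    simp only [gt_iff_lt, hkpos, if_true, pvDivmod_nat k bd.length hL, Option.getD_some]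
    simp only [pvBFold ((k / bd.length : Nat) : Int) ((k % bd.length : Nat) : Int)]
    simp only [pvEX_eq_pvS, zero_add]
    simp [Int.toNat_natCast]
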